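-- pv_equiv track=rewrite | github.com/tlijkkkk/mark_v | leetcode-practice/leetcode_practice/data_structure/stack+queue+recursion/leetcode2832_max_range_max.py | max_range_max
-- ===== SOURCE A (Python) =====
-- from typing import List
--
-- def max_range_max(nums: List[int]) -> List[int]:
--     result: List[int] = [0] * len(nums)
--
--     mono_desc: List[int] = []
--     for i in range(len(nums)):
--         while mono_desc and nums[mono_desc[-1]] < nums[i]:
--             mono_desc.pop()
--         result[i] += i - mono_desc[-1] if mono_desc else i + 1
--         mono_desc.append(i)
--
--     mono_asc: List[int] = []
--     for i in range(len(nums) - 1, -1, -1):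
--         while mono_asc and nums[mono_asc[-1]] < nums[i]:
--             mono_asc.pop()
--         result[i] += mono_asc[-1] - i if mono_asc else len(nums) - i
--         result[i] -= 1
--         mono_asc.append(i)
--
--     return result
-- ===== SOURCE B (Python) =====
-- from typing import List
--
-- def max_range_max(nums: List[int]) -> List[int]:
--     # For each i, expand: the window is bounded by the nearest element >= nums[i] on each side.
--     n = len(nums)
--     res: List[int] = []
--     for i in range(n):
--         l = i - 1
--         while l >= 0 and nums[l] < nums[i]:
--             l -= 1
--         r = i + 1
--         while r < n and nums[r] < nums[i]:
--             r += 1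
--         res.append(r - l - 1)
--     return res
-- ===== Notes on version B (the rewrite author's own statement) =====
-- stated objective: alternative
-- what changed: Replaced A's two monotonic-stack passes accumulating into a preallocated array by a single pass that, for each index, scans outward for the nearest >= neighbour on each side and appends r-l-1.
import Mathlib
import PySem

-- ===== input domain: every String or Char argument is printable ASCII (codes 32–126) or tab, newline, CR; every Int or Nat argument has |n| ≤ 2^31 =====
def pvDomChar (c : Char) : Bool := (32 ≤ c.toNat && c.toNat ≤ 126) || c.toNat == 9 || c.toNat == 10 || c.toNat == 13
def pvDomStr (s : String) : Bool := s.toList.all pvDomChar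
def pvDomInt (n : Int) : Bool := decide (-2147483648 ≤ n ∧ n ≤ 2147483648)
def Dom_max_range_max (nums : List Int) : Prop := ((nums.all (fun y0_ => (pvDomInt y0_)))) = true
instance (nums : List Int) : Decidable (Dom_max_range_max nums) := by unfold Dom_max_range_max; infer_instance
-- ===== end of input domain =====

-- B replaces A's two monotonic-stack passes by a direct per-element outward scan for the
-- nearest >= neighbour on each side (different decomposition; O(n^2) worst case, not claimed faster).


-- ===== PORT A =====
-- 'while mono and nums[mono[-1]] < v: mono.pop()'  (stack top at the head)
def pvPop (nums : List Int) (v : Int) : List Nat → List Nat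
  | [] => []
  | j :: rest => if nums.getD j 0 < v then pvPop nums v rest else j :: rest

-- one iteration of the first (left-to-right) for-loop: result[i] += i - mono[-1] if mono else i + 1
def stepL (nums : List Int) (st : List Int × List Nat) (i : Nat) : List Int × List Nat :=
  (st.1.set i (st.1.getD i 0 +
      (match pvPop nums (nums.getD i 0) st.2 with
        | [] => (i : Int) + 1
        | j :: _ => (i : Int) - (j : Int))),
    i :: pvPop nums (nums.getD i 0) st.2)

-- one iteration of the second (right-to-left) for-loop: result[i] += (mono[-1] - i if mono else n - i) - 1
def stepR (nums : List Int) (n : Nat) (st : List Int × List Nat) (i : Nat) : List Int × List Nat :=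
  (st.1.set i (st.1.getD i 0 +
      (match pvPop nums (nums.getD i 0) st.2 with
        | [] => (n : Int) - (i : Int)
        | j :: _ => (j : Int) - (i : Int)) - 1),
    i :: pvPop nums (nums.getD i 0) st.2)

def max_range_max (nums : List Int) : List Int :=
  let n := nums.length
  let left := (List.range n).foldl (stepL nums) (List.replicate n (0 : Int), ([] : List Nat))
  let right := (List.range n).reverse.foldl (stepR nums n) (left.1, ([] : List Nat))
  right.1

-- ===== PORT B =====
-- 'l = i - 1; while l >= 0 and nums[l] < v: l -= 1'  (the argument is l + 1, so 0 stands for l = -1)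
def pvScanL (nums : List Int) (v : Int) : Nat → Int
  | 0 => -1
  | l + 1 => if nums.getD l 0 < v then pvScanL nums v l else (l : Int)

-- 'r = i + 1; while r < n and nums[r] < v: r += 1'
def pvScanR (nums : List Int) (v : Int) (n : Nat) (r : Nat) : Int :=
  if r < n then (if nums.getD r 0 < v then pvScanR nums v n (r + 1) else (r : Int))
  else (n : Int)
  termination_by n - r

def max_range_max_alt (nums : List Int) : List Int :=
  (List.range nums.length).map (fun i =>
    pvScanR nums (nums.getD i 0) nums.length (i + 1) - pvScanL nums (nums.getD i 0) i - 1)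

-- ===== PRECONDITION & SPEC =====
def Spec_max_range_max (nums : List Int) (out : List Int) : Prop := out = max_range_max_alt nums
instance (nums : List Int) (out : List Int) : Decidable (Spec_max_range_max nums out) := by unfold Spec_max_range_max; infer_instance

-- ===== CLAIM (what is proved, stated in full; the proofs are below) =====
def Claim_equal_max_range_max : Prop := ∀ (nums : List Int), Dom_max_range_max nums → Spec_max_range_max nums (max_range_max nums)

-- ===== LEMMAS AND PROOFS =====

-- the left stack after processing indices 0..i-1
def stackL (nums : List Int) : Nat → List Nat
  | 0 => []
  | i + 1 => i :: pvPop nums (nums.getD i 0) (stackL nums i)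

-- the right stack after processing indices n-1 down to k
def stackR (nums : List Int) (n : Nat) (k : Nat) : List Nat :=
  if k < n then k :: pvPop nums (nums.getD k 0) (stackR nums n (k + 1))
  else []
  termination_by n - k

def headDL : List Nat → Int
  | [] => -1
  | j :: _ => (j : Int)

def headDR (n : Nat) : List Nat → Int
  | [] => (n : Int)
  | j :: _ => (j : Int)

-- result[i] after the first loop, and the final result[i]
def lval (nums : List Int) (i : Nat) : Int := (i : Int) - pvScanL nums (nums.getD i 0) i
def tval (nums : List Int) (i : Nat) : Int :=
  lval nums i + (pvScanR nums (nums.getD i 0) nums.length (i + 1) - (i : Int)) - 1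

theorem pvPop_pvPop (nums : List Int) (v w : Int) (h : w ≤ v) :
    ∀ S : List Nat, pvPop nums v (pvPop nums w S) = pvPop nums v S := by
  intro S
  induction S with
  | nil => rfl
  | cons j rest ih =>
    simp only [pvPop]
    split_ifs with h1 h2 h3
    · exact ih
    · exact absurd (lt_of_lt_of_le h1 h) h2
    · rw [pvPop, if_pos h3]
    · rw [pvPop, if_neg h3]

theorem stackL_scan (nums : List Int) :
    ∀ (i : Nat) (v : Int), headDL (pvPop nums v (stackL nums i)) = pvScanL nums v i := by
  intro i
  induction i with
  | zero => intro v; rfl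
  | succ i ih =>
    intro v
    rw [stackL]
    by_cases hv : nums.getD i 0 < v
    · rw [pvPop, if_pos hv, pvPop_pvPop nums v (nums.getD i 0) (le_of_lt hv), ih]
      conv_rhs => rw [pvScanL]
      rw [if_pos hv]
    · rw [pvPop, if_neg hv]
      conv_rhs => rw [pvScanL]
      rw [if_neg hv]
      rfl

theorem stackR_scan_aux (nums : List Int) (n : Nat) :
    ∀ (m k : Nat), n - k ≤ m → ∀ v : Int,
      headDR n (pvPop nums v (stackR nums n k)) = pvScanR nums v n k := by
  intro m
  induction m with
  | zero =>
    intro k hk v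
    have hkn : ¬ k < n := by omega
    rw [stackR, if_neg hkn, pvScanR, if_neg hkn]
    rfl
  | succ m ih =>
    intro k hk v
    by_cases hkn : k < n
    · conv_rhs => rw [pvScanR]
      rw [if_pos hkn, stackR, if_pos hkn]
      by_cases hv : nums.getD k 0 < v
      · rw [pvPop, if_pos hv, pvPop_pvPop nums v (nums.getD k 0) (le_of_lt hv),
            ih (k + 1) (by omega) v, if_pos hv]
      · rw [pvPop, if_neg hv, if_neg hv]
        rfl
    · rw [stackR, if_neg hkn, pvScanR, if_neg hkn]
      rfl

theorem stackR_scan (nums : List Int) (n : Nat) (k : Nat) (v : Int) :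
    headDR n (pvPop nums v (stackR nums n k)) = pvScanR nums v n k :=
  stackR_scan_aux nums n (n - k) k (le_refl _) v

theorem getD_at {α : Type} [Inhabited α] (pre post : List α) (x d : α) (m : Nat)
    (hm : pre.length = m) : (pre ++ x :: post).getD m d = x := by
  subst hm
  induction pre with
  | nil => rfl
  | cons y ys ih => simp

theorem set_at {α : Type} (pre post : List α) (x v : α) (m : Nat)
    (hm : pre.length = m) : (pre ++ x :: post).set m v = pre ++ v :: post := by
  subst hm
  induction pre with
  | nil => rfl
  | cons y ys ih => simp

-- invariant of the first loop
theorem foldL_inv (nums : List Int) :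
    ∀ m, m ≤ nums.length →
      (List.range m).foldl (stepL nums) (List.replicate nums.length (0 : Int), ([] : List Nat)) =
      ((List.range m).map (lval nums) ++ List.replicate (nums.length - m) (0 : Int),
        stackL nums m) := by
  intro m
  induction m with
  | zero => intro _; simp [stackL]
  | succ m ih =>
    intro hm
    rw [List.range_succ, List.foldl_append, ih (by omega)]
    have hrep : List.replicate (nums.length - m) (0 : Int)
        = (0 : Int) :: List.replicate (nums.length - (m + 1)) (0 : Int) := by
      have h : nums.length - m = (nums.length - (m + 1)) + 1 := by omega
      rw [h, List.replicate_succ]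
    have hadd : (match pvPop nums (nums.getD m 0) (stackL nums m) with
        | [] => (m : Int) + 1
        | j :: _ => (m : Int) - (j : Int)) = lval nums m := by
      have h := stackL_scan nums m (nums.getD m 0)
      unfold lval
      cases hc : pvPop nums (nums.getD m 0) (stackL nums m) with
      | nil => rw [hc] at h; simp only [headDL] at h; rw [← h]; ring
      | cons j rest => rw [hc] at h; simp only [headDL] at h; rw [← h]
    simp only [List.foldl_cons, List.foldl_nil, stepL, Prod.mk.injEq]
    refine ⟨?_, by rw [stackL]⟩
    rw [hrep, getD_at _ _ _ _ m (by simp), set_at _ _ _ _ m (by simp), hadd, zero_add]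
    simp

-- invariant of the second loop (processing indices n-1 down to n-m)
theorem foldR_inv (nums : List Int) :
    ∀ m, m ≤ nums.length →
      ((List.range' (nums.length - m) m).reverse).foldl (stepR nums nums.length)
        ((List.range nums.length).map (lval nums), ([] : List Nat)) =
      ((List.range (nums.length - m)).map (lval nums)
          ++ (List.range' (nums.length - m) m).map (tval nums),
        stackR nums nums.length (nums.length - m)) := by
  intro m
  induction m with
  | zero =>
    intro _
    have h : nums.length - 0 = nums.length := by omega
    rw [h]
    simp [stackR]
  | succ m ih =>
    intro hm
    have hk : nums.length - (m + 1) < nums.length := by omega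
    have hk1 : nums.length - m = (nums.length - (m + 1)) + 1 := by omega
    have ihm := ih (by omega)
    rw [hk1] at ihm
    rw [List.range'_succ, List.reverse_cons, List.foldl_append, ihm]
    have hsplit : (List.range ((nums.length - (m + 1)) + 1)).map (lval nums)
        = (List.range (nums.length - (m + 1))).map (lval nums)
          ++ [lval nums (nums.length - (m + 1))] := by
      rw [List.range_succ, List.map_append]
      rfl
    have hadd : (match pvPop nums (nums.getD (nums.length - (m + 1)) 0)
          (stackR nums nums.length ((nums.length - (m + 1)) + 1)) with
        | [] => (nums.length : Int) - ((nums.length - (m + 1) : Nat) : Int)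
        | j :: _ => (j : Int) - ((nums.length - (m + 1) : Nat) : Int))
        = pvScanR nums (nums.getD (nums.length - (m + 1)) 0) nums.length
            ((nums.length - (m + 1)) + 1) - ((nums.length - (m + 1) : Nat) : Int) := by
      have h := stackR_scan nums nums.length ((nums.length - (m + 1)) + 1)
        (nums.getD (nums.length - (m + 1)) 0)
      cases hc : pvPop nums (nums.getD (nums.length - (m + 1)) 0)
          (stackR nums nums.length ((nums.length - (m + 1)) + 1)) with
      | nil => rw [hc] at h; simp only [headDR] at h; rw [← h]
      | cons j rest => rw [hc] at h; simp only [headDR] at h; rw [← h]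
    simp only [List.foldl_cons, List.foldl_nil, stepR, Prod.mk.injEq]
    constructor
    · rw [hsplit, List.append_assoc, List.singleton_append,
        getD_at _ _ _ _ (nums.length - (m + 1)) (by simp),
        set_at _ _ _ _ (nums.length - (m + 1)) (by simp), hadd, List.map_cons]
      rfl
    · conv_rhs => rw [stackR]
      rw [if_pos hk]

-- ===== VERDICT (by name: the statement is the Claim_ definition above) =====
theorem max_range_max_spec : Claim_equal_max_range_max := by
  intro nums _
  unfold Spec_max_range_max
  simp only [max_range_max]
  rw [foldL_inv nums nums.length (le_refl _)]
  have hrep : List.replicate (nums.length - nums.length) (0 : Int) = [] := by simp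
  rw [hrep, List.append_nil]
  have hrev : (List.range nums.length).reverse
      = (List.range' (nums.length - nums.length) nums.length).reverse := by
    rw [Nat.sub_self, ← List.range_eq_range']
  rw [hrev, foldR_inv nums nums.length (le_refl _), Nat.sub_self]
  simp only [List.range_zero, List.map_nil, List.nil_append]
  rw [← List.range_eq_range']
  unfold max_range_max_alt tval lval
  apply List.map_congr_left
  intro i _
  ring
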